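-- pv_equiv track=rewrite | github.com/qszhao/PTUA2023 | Lab04/gal.py | histogram_dic
-- ===== SOURCE A (Python) =====
-- def histogram_dic(gal):
--     """ return a second dictionary that has the histogram for the neighbor cardinalities.
--
--     gal: dictionary
--
--     Returns: dictionary
--     """
--     number = []
--     for i in gal:
--         number.append(len(gal[i]))  # list of the number of neighbors
--
--     histogram = {}
--     for i,key in enumerate(number): # key: the number of neighbors
--                                     # i: the id of a unit
--         if key not in histogram :
--             histogram[key] = []
--         histogram[key].append(i+1)
--     return histogram
-- ===== SOURCE B (Python) =====
-- def histogram_dic(gal):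
--     counts = [len(v) for v in gal.values()]
--     return {k: [i + 1 for i, c in enumerate(counts) if c == k]
--             for k in dict.fromkeys(counts)}
-- ===== Notes on version B (the rewrite author's own statement) =====
-- stated objective: idiomatic
-- what changed: Replaces the two explicit accumulation loops (building the counts list, then bucket-appending into a dict with a membership check) by a counts comprehension plus a dict comprehension that deduplicates the counts with dict.fromkeys and collects each bucket with one filtered enumerate scan.
import Mathlib
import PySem

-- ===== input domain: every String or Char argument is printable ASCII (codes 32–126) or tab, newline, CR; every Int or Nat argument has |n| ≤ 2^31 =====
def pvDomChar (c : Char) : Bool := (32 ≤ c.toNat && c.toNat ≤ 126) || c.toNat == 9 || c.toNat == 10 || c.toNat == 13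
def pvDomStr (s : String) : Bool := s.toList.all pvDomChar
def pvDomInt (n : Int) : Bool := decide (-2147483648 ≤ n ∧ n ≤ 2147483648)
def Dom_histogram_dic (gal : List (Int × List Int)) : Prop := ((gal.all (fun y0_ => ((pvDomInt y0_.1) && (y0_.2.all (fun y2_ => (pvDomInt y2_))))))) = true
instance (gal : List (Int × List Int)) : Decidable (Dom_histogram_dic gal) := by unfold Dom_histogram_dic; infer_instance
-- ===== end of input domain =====

-- B replaces A's two accumulation loops by a dedup-of-counts plus one filtered scan per distinct count (idiomatic dict comprehension); same values, same order.


-- ===== PORT A =====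
def histogram_dic (gal : List (Int × List Int)) : List (Int × List Int) :=
  -- number = []; for i in gal: number.append(len(gal[i]))
  let number : List Int := gal.map (fun p => PySem.List.len ((PySem.Dict.mk gal).getD p.1 []))
  -- histogram = {}; for i, key in enumerate(number): if key not in histogram: histogram[key] = []; histogram[key].append(i+1)
  let histogram : PySem.Dict Int (List Int) :=
    (PySem.List.enumerate number 0).foldl
      (fun d p =>
        let d' := if d.contains p.2 then d else d.insert p.2 []
        d'.modify p.2 [] (fun v => v ++ [p.1 + 1]))
      PySem.Dict.empty
  histogram.items

-- ===== PORT B =====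
def histogram_dic_alt (gal : List (Int × List Int)) : List (Int × List Int) :=
  let counts : List Int := gal.map (fun p => PySem.List.len p.2)
  (PySem.List.dedup counts).map (fun k =>
    (k, ((PySem.List.enumerate counts 0).filter (fun p => p.2 == k)).map (fun p => p.1 + 1)))

-- ===== PRECONDITION & SPEC =====
-- Pre_ excludes association lists with duplicate keys: a Python dict (A's declared input) cannot hold them, so such lists have no dict counterpart.
def Pre_histogram_dic (gal : List (Int × List Int)) : Prop := (gal.map Prod.fst).Nodup
instance (gal : List (Int × List Int)) : Decidable (Pre_histogram_dic gal) := by unfold Pre_histogram_dic; infer_instance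
def pvWitness_histogram_dic : (List (Int × List Int)) := [(1, [2, 3]), (2, []), (5, [1])]
def Spec_histogram_dic (gal : List (Int × List Int)) (out : List (Int × List Int)) : Prop := out = histogram_dic_alt gal
instance (gal : List (Int × List Int)) (out : List (Int × List Int)) : Decidable (Spec_histogram_dic gal out) := by unfold Spec_histogram_dic; infer_instance

-- ===== CLAIM (what is proved, stated in full; the proofs are below) =====
def Claim_equal_histogram_dic : Prop := ∀ (gal : List (Int × List Int)), Dom_histogram_dic gal → Pre_histogram_dic gal → Spec_histogram_dic gal (histogram_dic gal)

-- ===== LEMMAS AND PROOFS =====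

lemma step_if_modify (d : PySem.Dict Int (List Int)) (k : Int) (f : List Int → List Int) :
    (if d.contains k then d else d.insert k []).modify k [] f = d.modify k [] f := by
  by_cases h : d.contains k
  · simp [h]
  · have h' : d.contains k = false := by simpa using h
    simp [PySem.Dict.modify, h', PySem.Dict.getD_insert_self, PySem.Dict.insert_insert_self,
      PySem.Dict.getD_of_not_contains (h := h')]

lemma fold_if_eq (l : List (Int × Int)) (d : PySem.Dict Int (List Int)) :
    l.foldl (fun d p =>
        (if d.contains p.2 then d else d.insert p.2 []).modify p.2 [] (fun v => v ++ [p.1 + 1])) d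
      = l.foldl (fun d p => d.modify p.2 [] (fun v => v ++ [p.1 + 1])) d := by
  induction l generalizing d with
  | nil => rfl
  | cons q t ih => rw [List.foldl_cons, List.foldl_cons, step_if_modify]; exact ih _

-- ===== VERDICT (by name: the statement is the Claim_ definition above) =====
theorem histogram_dic_spec : Claim_equal_histogram_dic := by
  intro gal _ hpre
  unfold Spec_histogram_dic histogram_dic histogram_dic_alt
  simp only []
  -- with distinct keys, gal[p.1] is p.2, so A's `number` is B's `counts`
  have hnum : gal.map (fun p => PySem.List.len ((PySem.Dict.mk gal).getD p.1 []))
      = gal.map (fun p => PySem.List.len p.2) := by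
    apply List.map_congr_left
    intro p hp
    congr 1
    exact PySem.Dict.getD_of_mem_items _ (k := p.1) (v := p.2) (by simpa using hp) hpre []
  rw [hnum, fold_if_eq]
  set counts : List Int := gal.map (fun p => PySem.List.len p.2) with hc
  have hfold :
      (PySem.List.enumerate counts 0).foldl
          (fun d p => d.modify p.2 [] (fun v => v ++ [p.1 + 1])) PySem.Dict.empty
        = ((PySem.List.enumerate counts 0).map (fun p => ((p.2 : Int), p.1 + 1))).foldl
          (fun d q => d.modify q.1 [] (fun v => v ++ [q.2]))
          (PySem.Dict.empty : PySem.Dict Int (List Int)) := by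
    rw [List.foldl_map]
  rw [hfold]
  set dF := ((PySem.List.enumerate counts 0).map (fun p => ((p.2 : Int), p.1 + 1))).foldl
      (fun d q => d.modify q.1 [] (fun v => v ++ [q.2]))
      (PySem.Dict.empty : PySem.Dict Int (List Int)) with hdF
  have hkeys : dF.keys = PySem.List.dedup counts := by
    rw [hdF, PySem.Dict.keys_foldl_modify_key]
    simp [List.map_map, Function.comp_def, PySem.List.map_snd_enumerate, PySem.Set.update_nil_left]
  have hnodup : dF.keys.Nodup := by
    rw [hkeys, PySem.List.dedup_eq_ofList]
    exact PySem.Set.nodup_ofList (α := Int) (xs := counts)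
  have hgetD : ∀ k : Int, dF.getD k []
      = ((PySem.List.enumerate counts 0).filter (fun p => p.2 == k)).map (fun p => p.1 + 1) := by
    intro k
    rw [hdF, PySem.Dict.getD_foldl_modify_append]
    simp [List.filter_map, List.map_map, Function.comp_def]
  rw [PySem.Dict.items_eq_map_keys dF hnodup [], hkeys]
  exact List.map_congr_left (fun k _ => by rw [hgetD k])
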